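-- pv_equiv track=rewrite | github.com/liskos/isakovich2023 | ege27/21.py | clasterisation2
-- ===== SOURCE A (Python) =====
-- def clasterisation2(data):
--     clasters = [[], [], []]
--     for x, y in data:
--         if x < 5 and y > 5:
--             clasters[0].append([x, y])
--         elif 1 < x < 6 and 1 < y < 5:
--             clasters[1].append([x, y])
--         elif 7 < x < 11 and 2 < y < 7:
--             clasters[2].append([x, y])
--     return clasters
-- ===== SOURCE B (Python) =====
-- def clasterisation2(data):
--     return [
--         [[x, y] for x, y in data if x < 5 and y > 5],
--         [[x, y] for x, y in data if 1 < x < 6 and 1 < y < 5],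
--         [[x, y] for x, y in data if 7 < x < 11 and 2 < y < 7],
--     ]
-- ===== Notes on version B (the rewrite author's own statement) =====
-- stated objective: simpler
-- what changed: Replaced the single loop with chained elif branches and mutable accumulators by three independent list comprehensions, one per region; the regions are pairwise disjoint so each point lands in the same cluster in the same order.
import Mathlib
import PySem

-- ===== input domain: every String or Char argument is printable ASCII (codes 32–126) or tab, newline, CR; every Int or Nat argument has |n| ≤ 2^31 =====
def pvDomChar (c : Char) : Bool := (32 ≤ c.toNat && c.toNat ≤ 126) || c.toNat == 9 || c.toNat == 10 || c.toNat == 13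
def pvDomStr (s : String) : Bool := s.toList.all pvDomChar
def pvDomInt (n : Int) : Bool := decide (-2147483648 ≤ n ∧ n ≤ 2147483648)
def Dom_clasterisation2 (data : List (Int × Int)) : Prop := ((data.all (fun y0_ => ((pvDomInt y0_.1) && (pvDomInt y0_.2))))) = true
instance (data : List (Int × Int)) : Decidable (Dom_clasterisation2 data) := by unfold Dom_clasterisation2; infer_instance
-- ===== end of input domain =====

-- B replaces A's single loop with chained elif branches by three independent comprehensions over pairwise-disjoint regions (objective: simpler).


-- ===== PORT A =====
def pvLoopA (data : List (Int × Int)) (c0 c1 c2 : List (List Int)) : List (List (List Int)) :=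
  match data with
  | [] => [c0, c1, c2]
  | (x, y) :: rest =>
    if x < 5 ∧ y > 5 then pvLoopA rest (c0 ++ [[x, y]]) c1 c2
    else if 1 < x ∧ x < 6 ∧ 1 < y ∧ y < 5 then pvLoopA rest c0 (c1 ++ [[x, y]]) c2
    else if 7 < x ∧ x < 11 ∧ 2 < y ∧ y < 7 then pvLoopA rest c0 c1 (c2 ++ [[x, y]])
    else pvLoopA rest c0 c1 c2

def clasterisation2 (data : List (Int × Int)) : List (List (List Int)) :=
  pvLoopA data [] [] []

-- ===== PORT B =====
def clasterisation2_alt (data : List (Int × Int)) : List (List (List Int)) :=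
  [ (data.filter (fun p => decide (p.1 < 5 ∧ p.2 > 5))).map (fun p => [p.1, p.2]),
    (data.filter (fun p => decide (1 < p.1 ∧ p.1 < 6 ∧ 1 < p.2 ∧ p.2 < 5))).map (fun p => [p.1, p.2]),
    (data.filter (fun p => decide (7 < p.1 ∧ p.1 < 11 ∧ 2 < p.2 ∧ p.2 < 7))).map (fun p => [p.1, p.2]) ]

-- ===== PRECONDITION & SPEC =====
def Spec_clasterisation2 (data : List (Int × Int)) (out : List (List (List Int))) : Prop := out = clasterisation2_alt data
instance (data : List (Int × Int)) (out : List (List (List Int))) : Decidable (Spec_clasterisation2 data out) := by unfold Spec_clasterisation2; infer_instance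

-- ===== CLAIM (what is proved, stated in full; the proofs are below) =====
def Claim_equal_clasterisation2 : Prop := ∀ (data : List (Int × Int)), Dom_clasterisation2 data → Spec_clasterisation2 data (clasterisation2 data)

-- ===== LEMMAS AND PROOFS =====

-- ===== VERDICT (by name: the statement is the Claim_ definition above) =====
theorem pvLoopA_eq (data : List (Int × Int)) : ∀ (c0 c1 c2 : List (List Int)),
    pvLoopA data c0 c1 c2 =
      [ c0 ++ (data.filter (fun p => decide (p.1 < 5 ∧ p.2 > 5))).map (fun p => [p.1, p.2]),
        c1 ++ (data.filter (fun p => decide (1 < p.1 ∧ p.1 < 6 ∧ 1 < p.2 ∧ p.2 < 5))).map (fun p => [p.1, p.2]),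
        c2 ++ (data.filter (fun p => decide (7 < p.1 ∧ p.1 < 11 ∧ 2 < p.2 ∧ p.2 < 7))).map (fun p => [p.1, p.2]) ] := by
  induction data with
  | nil => simp [pvLoopA]
  | cons hd tl ih =>
    intro c0 c1 c2
    obtain ⟨x, y⟩ := hd
    by_cases h0 : x < 5 ∧ y > 5
    · rw [pvLoopA, if_pos h0, ih,
        List.filter_cons, if_pos (by simp; omega),
        List.filter_cons, if_neg (by simp; omega),
        List.filter_cons, if_neg (by simp; omega)]
      simp
    · by_cases h1 : 1 < x ∧ x < 6 ∧ 1 < y ∧ y < 5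
      · rw [pvLoopA, if_neg h0, if_pos h1, ih,
          List.filter_cons, if_neg (by simp; omega),
          List.filter_cons, if_pos (by simp; omega),
          List.filter_cons, if_neg (by simp; omega)]
        simp
      · by_cases h2 : 7 < x ∧ x < 11 ∧ 2 < y ∧ y < 7
        · rw [pvLoopA, if_neg h0, if_neg h1, if_pos h2, ih,
            List.filter_cons, if_neg (by simp; omega),
            List.filter_cons, if_neg (by simp; omega),
            List.filter_cons, if_pos (by simp; omega)]
          simp
        · rw [pvLoopA, if_neg h0, if_neg h1, if_neg h2, ih,
            List.filter_cons, if_neg (by simp; omega),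
            List.filter_cons, if_neg (by simp; omega),
            List.filter_cons, if_neg (by simp; omega)]

theorem clasterisation2_spec : Claim_equal_clasterisation2 := by
  intro data _
  unfold Spec_clasterisation2 clasterisation2 clasterisation2_alt
  simp [pvLoopA_eq]
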